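-- pv_equiv track=rewrite | github.com/TurnerAtwood/Kattis | Trivial/Heir.py | numbersInRange
-- ===== SOURCE A (Python) =====
-- def numbersInRange(L, H):
--     count = 0
--     for num in range(L, H+1):
--         digits = set(str(num))
--         if len(digits) < 6 or '0' in digits:
--             continue
--
--         good = True
--         for digit in digits:
--             remainder = num % (int(digit))
--             if remainder != 0:
--                 good = False
--                 break
--         if not good:
--             continue
--
--         count += 1
--     return count
-- ===== SOURCE B (Python) =====
-- def numbersInRange(L, H):
--     # Enumerate the 130 digit subsets of {1..9} of size >= 6; for each, stride over
--     # the multiples of the subset's lcm inside [L, H] (divisibility by every digit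
--     # is automatic there) and count those whose exact digit set is that subset.
--     # Each qualifying number is counted once, for the subset equal to its digit set.
--     count = 0
--     for mask in range(63, 512):
--         digits = [d for d in range(1, 10) if mask >> (d - 1) & 1]
--         if len(digits) < 6:
--             continue
--         l = 1
--         for d in digits:
--             g, x = l, d
--             while x > 0:
--                 g, x = x, g % x
--             l = l // g * d
--         lo = max(L, 1)
--         start = -(-lo // l) * l
--         for num in range(start, H + 1, l):
--             n, m = num, 0
--             while n > 0:
--                 n, d = divmod(n, 10)
--                 if d == 0:
--                     m = -1
--                     break
--                 m |= 1 << (d - 1)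
--             if m == mask:
--                 count += 1
--     return count
-- ===== Notes on version B (the rewrite author's own statement) =====
-- stated objective: faster
-- what changed: Instead of A's linear scan of every integer in [L,H] with a per-number str/set digit check, B enumerates the 130 digit subsets of {1..9} of size >= 6 and, for each, strides only over the multiples of the subset's lcm in the range (divisibility by all digits is automatic there), counting those whose exact digit set equals the subset; each qualifying number is counted once.
-- outside the precondition, e.g. on numbersInRange(-123648, -123648): A raises ValueError, B returns 0; on numbersInRange(-20000, -19999): A returns 0, B returns 0
import Mathlib
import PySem

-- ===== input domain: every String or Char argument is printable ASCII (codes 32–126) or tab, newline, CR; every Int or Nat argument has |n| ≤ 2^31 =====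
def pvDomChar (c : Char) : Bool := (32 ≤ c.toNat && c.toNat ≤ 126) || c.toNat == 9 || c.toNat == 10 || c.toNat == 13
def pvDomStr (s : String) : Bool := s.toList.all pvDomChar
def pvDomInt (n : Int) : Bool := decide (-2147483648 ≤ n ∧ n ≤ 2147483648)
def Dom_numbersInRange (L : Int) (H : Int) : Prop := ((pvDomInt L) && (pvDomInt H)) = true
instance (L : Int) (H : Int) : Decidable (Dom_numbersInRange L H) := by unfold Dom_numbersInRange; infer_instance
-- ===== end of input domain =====

-- B replaces A's linear scan of [L,H] by an enumeration of the 130 digit subsets of {1..9}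
-- of size >= 6, striding only over multiples of each subset's lcm (objective: faster).


-- ===== PORT A =====
-- for num in range(L, H+1): digits = set(str(num)); length/'0' test; then per-digit modulo.
-- The inner 'for digit in digits: … break' is ported as List.all: its Boolean result does not
-- depend on set iteration order on inputs where no exception occurs (guaranteed by Pre_).
-- int(digit) is ported as (ofChars? [digit]).getD 0; the getD is unreachable under Pre_
-- (Python raises ValueError exactly there, on the '-' character).
def numbersInRange (L : Int) (H : Int) : Int :=
  (PySem.List.pyRange L (H + 1) 1).foldl (fun count num =>
    let digits : PySem.Set Char := PySem.Set.ofList (PySem.Int.toStr num).toList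
    if digits.length < 6 ∨ PySem.Set.contains digits '0' = true then count
    else
      let good := digits.all (fun digit =>
        PySem.Int.mod num ((PySem.Int.ofChars? [digit]).getD 0) == 0)
      if !good then count else count + 1) 0

-- ===== PORT B =====
-- termination helper for the two while-loops below
theorem pvModToNatLt (g x : Int) (h : 0 < x) : (PySem.Int.mod g x).toNat < x.toNat := by
  have h1 := PySem.Int.mod_nonneg g h
  have h2 := PySem.Int.mod_lt g h
  omega

theorem pvFloordiv10ToNatLt (n : Int) (h : 0 < n) :
    (PySem.Int.floordiv n 10).toNat < n.toNat := by
  rw [PySem.Int.floordiv_eq_ediv_of_pos (by norm_num)]; omega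

-- digits = [d for d in range(1, 10) if mask >> (d - 1) & 1]
-- (mask ≥ 0 and d - 1 ≥ 0 here, so '.toNat' on the shift amount is exact)
def altDigits (mask : Int) : List Int :=
  (PySem.List.pyRange 1 10 1).filter (fun d => PySem.Int.band (mask >>> (d - 1).toNat) 1 != 0)

-- g, x = l, d; while x > 0: g, x = x, g % x   (returns final g)
def altGcdLoop (g x : Int) : Int :=
  if h : 0 < x then altGcdLoop x (PySem.Int.mod g x) else g
termination_by x.toNat
decreasing_by exact pvModToNatLt g x h

-- l = 1; for d in digits: l = l // g * d  with g from the Euclid loop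
def altLcm (ds : List Int) : Int :=
  ds.foldl (fun l d => PySem.Int.floordiv l (altGcdLoop l d) * d) 1

-- n, m = num, 0; while n > 0: n, d = divmod(n, 10); zero digit -> m = -1, break; else m |= 1 << (d-1)
-- (in the else-branch d ≥ 1, so '(d-1).toNat' is exact for Python's 1 << (d-1))
def altMaskLoop (n m : Int) : Int :=
  if h : 0 < n then
    let d := PySem.Int.mod n 10
    if d == 0 then -1
    else altMaskLoop (PySem.Int.floordiv n 10) (PySem.Int.bor m (1 <<< (d - 1).toNat))
  else m
termination_by n.toNat
decreasing_by exact pvFloordiv10ToNatLt n h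

-- start = -(-max(L,1) // l) * l  (first multiple of l ≥ max(L,1)); stride over range(start, H+1, l)
def numbersInRange_alt (L : Int) (H : Int) : Int :=
  (PySem.List.pyRange 63 512 1).foldl (fun count mask =>
    let digits := altDigits mask
    if digits.length < 6 then count
    else
      let l := altLcm digits
      let lo := max L 1
      let start := -(PySem.Int.floordiv (-lo) l) * l
      (PySem.List.pyRange start (H + 1) l).foldl
        (fun c num => if altMaskLoop num 0 == mask then c + 1 else c) count) 0

-- ===== PRECONDITION & SPEC =====
-- Pre_ excludes L < -10000: such ranges can contain negative numbers with five distinct nonzero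
-- digits (e.g. -12345), on which A's iteration over set(str(num)) raises ValueError on int('-')
-- or merely skips, depending on Python's nondeterministic set iteration order.
def Pre_numbersInRange (L : Int) (H : Int) : Prop := -10000 ≤ L
instance (L : Int) (H : Int) : Decidable (Pre_numbersInRange L H) := by
  unfold Pre_numbersInRange; infer_instance
def pvWitness_numbersInRange : Int × Int := (1, 30)

def Spec_numbersInRange (L : Int) (H : Int) (out : Int) : Prop := out = numbersInRange_alt L H
instance (L : Int) (H : Int) (out : Int) : Decidable (Spec_numbersInRange L H out) := by unfold Spec_numbersInRange; infer_instance

-- ===== CLAIM (what is proved, stated in full; the proofs are below) =====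
def Claim_equal_numbersInRange : Prop := ∀ (L : Int) (H : Int), Dom_numbersInRange L H → Pre_numbersInRange L H → Spec_numbersInRange L H (numbersInRange L H)

-- ===== LEMMAS AND PROOFS =====

-- the common reference predicate: num is positive, has no zero digit, at least six distinct
-- digits, and every digit divides num
def goodB (num : Int) : Bool :=
  decide (0 < num) &&
  decide (0 ∉ Nat.digits 10 num.toNat) &&
  decide (6 ≤ (Nat.digits 10 num.toNat).toFinset.card) &&
  (Nat.digits 10 num.toNat).all (fun d => PySem.Int.mod num (d : Int) == 0)

-- ---------- A-side ----------

theorem pvMod10Cast (m : Nat) : PySem.Int.mod (m : Int) 10 = ((m % 10 : Nat) : Int) := by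
  exact_mod_cast PySem.Int.mod_natCast m 10

theorem pvFloordiv10Cast (m : Nat) : PySem.Int.floordiv (m : Int) 10 = ((m / 10 : Nat) : Int) := by
  exact_mod_cast PySem.Int.floordiv_natCast m 10

-- str(m) for m > 0 is the decimal digit characters, most significant first
theorem toDigits_eq_digits (m : Nat) (h : 0 < m) :
    Nat.toDigits 10 m = ((Nat.digits 10 m).map Nat.digitChar).reverse := by
  induction m using Nat.strong_induction_on with
  | _ m IH =>
    have hdig := Nat.digits_def' (b := 10) (by norm_num) h
    rw [Nat.toDigits_eq_if (by norm_num), hdig]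
    by_cases hm : m < 10
    · rw [if_pos hm]
      have : m / 10 = 0 := Nat.div_eq_of_lt hm
      rw [this, Nat.mod_eq_of_lt hm]
      simp
    · rw [if_neg hm]
      have hpos : 0 < m / 10 := Nat.div_pos (le_of_not_gt hm) (by norm_num)
      rw [IH (m / 10) (Nat.div_lt_self h (by norm_num)) hpos]
      simp

-- Python's set(xs) has as many elements as xs has distinct elements
theorem set_ofList_length {α : Type} [DecidableEq α] (l : List α) :
    (PySem.Set.ofList l).length = l.toFinset.card := by
  have h1 : (PySem.Set.ofList l).Nodup := PySem.Set.nodup_ofList l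
  have h2 : (PySem.Set.ofList l).toFinset = l.toFinset := by
    ext x; simp [PySem.Set.mem_ofList]
  rw [← List.toFinset_card_of_nodup h1, h2]

theorem ofChars_digitChar (d : Nat) (h : d < 10) :
    (PySem.Int.ofChars? [Nat.digitChar d]).getD 0 = (d : Int) := by
  interval_cases d <;> decide

theorem digitChar_eq_zero_iff (d : Nat) (h : d < 10) : Nat.digitChar d = '0' ↔ d = 0 := by
  interval_cases d <;> decide

theorem digitChar_injOn (a b : Nat) (ha : a < 10) (hb : b < 10)
    (h : Nat.digitChar a = Nat.digitChar b) : a = b := by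
  interval_cases a <;> interval_cases b <;> revert h <;> decide

-- A's per-number body equals the reference predicate, for every num ≥ -10000
theorem bodyA_eq (num : Int) (hnum : -10000 ≤ num) (count : Int) :
    (if (PySem.Set.ofList (PySem.Int.toStr num).toList).length < 6 ∨
        PySem.Set.contains (PySem.Set.ofList (PySem.Int.toStr num).toList) '0' = true then count
     else if !((PySem.Set.ofList (PySem.Int.toStr num).toList).all fun digit =>
         PySem.Int.mod num ((PySem.Int.ofChars? [digit]).getD 0) == 0) then count
     else count + 1) =
    (if goodB num then count + 1 else count) := by
  rcases lt_or_ge 0 num with hpos | hneg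
  · set m := num.toNat with hmdef
    have hnumeq : num = (m : Int) := by omega
    have hm : 0 < m := by omega
    set ds := Nat.digits 10 m with hdsdef
    have hds10 : ∀ d ∈ ds, d < 10 := fun d hd => Nat.digits_lt_base (by norm_num) hd
    have hcs : (PySem.Int.toStr num).toList = (ds.map Nat.digitChar).reverse := by
      rw [PySem.Int.toList_toStr]
      simp only [PySem.Int.toChars, if_neg (by omega : ¬ num < 0)]
      rw [toDigits_eq_digits m hm]
    have hlen : (PySem.Set.ofList (PySem.Int.toStr num).toList).length = ds.toFinset.card := by
      rw [hcs, set_ofList_length, List.toFinset_reverse]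
      have himg : (ds.map Nat.digitChar).toFinset = ds.toFinset.image Nat.digitChar := by
        ext c; simp
      rw [himg, Finset.card_image_of_injOn]
      intro a ha b hb hab
      simp only [List.mem_toFinset, Finset.mem_coe] at ha hb
      exact digitChar_injOn a b (hds10 a ha) (hds10 b hb) hab
    have hzero : (PySem.Set.contains (PySem.Set.ofList (PySem.Int.toStr num).toList) '0' = true)
        ↔ 0 ∈ ds := by
      rw [PySem.Set.contains_iff, PySem.Set.mem_ofList, hcs]
      simp only [List.mem_reverse, List.mem_map]
      constructor
      · rintro ⟨d, hd, hdc⟩; rwa [(digitChar_eq_zero_iff d (hds10 d hd)).1 hdc] at hd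
      · intro h0; exact ⟨0, h0, rfl⟩
    have hall : ((PySem.Set.ofList (PySem.Int.toStr num).toList).all fun digit =>
        PySem.Int.mod num ((PySem.Int.ofChars? [digit]).getD 0) == 0) = true
        ↔ ∀ d ∈ ds, PySem.Int.mod num (d : Int) = 0 := by
      rw [List.all_eq_true]
      constructor
      · intro h d hd
        have := h (Nat.digitChar d) (by
          rw [PySem.Set.mem_ofList, hcs]
          simp only [List.mem_reverse, List.mem_map]
          exact ⟨d, hd, rfl⟩)
        rwa [ofChars_digitChar d (hds10 d hd), beq_iff_eq] at this
      · intro h c hc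
        rw [PySem.Set.mem_ofList, hcs] at hc
        simp only [List.mem_reverse, List.mem_map] at hc
        obtain ⟨d, hd, rfl⟩ := hc
        rw [ofChars_digitChar d (hds10 d hd), beq_iff_eq]
        exact h d hd
    have hgood : goodB num = (decide (0 ∉ ds) && decide (6 ≤ ds.toFinset.card) &&
        ds.all (fun d => PySem.Int.mod num (d : Int) == 0)) := by
      unfold goodB
      rw [← hmdef, ← hdsdef]
      simp [hpos, Bool.and_assoc]
    by_cases h0 : 0 ∈ ds
    · rw [if_pos (Or.inr (hzero.2 h0)), hgood]
      simp [h0]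
    · by_cases h6 : 6 ≤ ds.toFinset.card
      · by_cases hdv : ∀ d ∈ ds, PySem.Int.mod num (d : Int) = 0
        · rw [if_neg (by
            rw [not_or]
            exact ⟨by rw [hlen]; omega, fun hc => h0 (hzero.1 hc)⟩)]
          rw [hall.2 hdv]
          rw [hgood, show (ds.all (fun d => PySem.Int.mod num (d : Int) == 0)) = true from by
            rw [List.all_eq_true]; intro d hd; rw [beq_iff_eq]; exact hdv d hd]
          simp [h0, h6]
        · have hfb : ((PySem.Set.ofList (PySem.Int.toStr num).toList).all fun digit =>
              PySem.Int.mod num ((PySem.Int.ofChars? [digit]).getD 0) == 0) = false := by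
            rw [Bool.eq_false_iff, ne_eq, hall]
            exact hdv
          have hgb : (ds.all (fun d => PySem.Int.mod num (d : Int) == 0)) = false := by
            rw [Bool.eq_false_iff, ne_eq, List.all_eq_true]
            intro h
            exact hdv (fun d hd => beq_iff_eq.1 (h d hd))
          rw [hgood, hgb]
          by_cases hc : (PySem.Set.ofList (PySem.Int.toStr num).toList).length < 6 ∨
              PySem.Set.contains (PySem.Set.ofList (PySem.Int.toStr num).toList) '0' = true
          · rw [if_pos hc]; simp
          · rw [if_neg hc, hfb]; simp
      · rw [if_pos (Or.inl (by rw [hlen]; omega)), hgood]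
        simp [h6]
  · have hgood : goodB num = false := by
      unfold goodB
      simp [show ¬ (0 : Int) < num from by omega]
    rw [hgood]
    simp only [Bool.false_eq_true, if_false]
    rcases (by omega : num = 0 ∨ num < 0) with rfl | hlt
    · rw [if_pos (Or.inr (by rw [PySem.Int.toList_toStr]; decide))]
    · have hcs : (PySem.Int.toStr num).toList = '-' :: Nat.toDigits 10 num.natAbs := by
        rw [PySem.Int.toList_toStr]
        simp only [PySem.Int.toChars, if_pos hlt]
      rcases (by omega : num = -10000 ∨ num.natAbs < 10000) with rfl | habs
      · rw [if_pos (Or.inr (by rw [hcs]; decide))]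
      · have hlen4 : (Nat.toDigits 10 num.natAbs).length ≤ 4 :=
          Nat.toDigits_length 10 num.natAbs 4 (by norm_num) (by norm_num; omega)
        rw [if_pos (Or.inl (by
          calc (PySem.Set.ofList (PySem.Int.toStr num).toList).length
              ≤ (PySem.Int.toStr num).toList.length := PySem.Set.length_ofList_le _
            _ < 6 := by rw [hcs]; simp only [List.length_cons]; omega))]

-- A is the reference count over [L, H]
theorem A_eq_count (L H : Int) (hL : -10000 ≤ L) :
    numbersInRange L H = ((PySem.List.pyRange L (H + 1) 1).countP goodB : Int) := by
  unfold numbersInRange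
  rw [PySem.List.foldl_congr_mem _ _ (fun count num => if goodB num then count + 1 else count) 0
    (fun acc x hx => bodyA_eq x (by
      have := (PySem.List.mem_pyRange_one.1 hx).1
      omega) acc)]
  rw [PySem.List.foldl_if_add_one goodB _ 0, zero_add]

-- ---------- B-side ----------

-- the mask-building fold on the digit list, in Nat
def maskFold (ds : List Nat) (a : Nat) : Nat :=
  ds.foldl (fun a d => a ||| (1 <<< (d - 1))) a

theorem maskFold_testBit (ds : List Nat) (hds : ∀ d ∈ ds, 1 ≤ d) :
    ∀ (a : Nat) (i : Nat),
      (maskFold ds a).testBit i = (a.testBit i || decide ((i + 1) ∈ ds)) := by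
  unfold maskFold
  induction ds with
  | nil => intro a i; simp
  | cons d t IH =>
    intro a i
    have hd1 : 1 ≤ d := hds d List.mem_cons_self
    have ht : ∀ x ∈ t, 1 ≤ x := fun x hx => hds x (List.mem_cons_of_mem d hx)
    simp only [List.foldl_cons]
    rw [IH ht, Nat.testBit_or, Nat.shiftLeft_eq, one_mul, Nat.testBit_two_pow]
    have hiff : (d - 1 = i) ↔ (i + 1 = d) := by omega
    by_cases h1 : i + 1 = d <;> by_cases h2 : (i + 1) ∈ t <;>
      simp [List.mem_cons, h1, h2, hiff]

theorem maskFold_lt (ds : List Nat) (hds : ∀ d ∈ ds, d ≤ 9) :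
    ∀ a : Nat, a < 512 → maskFold ds a < 512 := by
  unfold maskFold
  induction ds with
  | nil => intro a ha; simpa using ha
  | cons d t IH =>
    intro a ha
    have hd : d ≤ 9 := hds d List.mem_cons_self
    simp only [List.foldl_cons]
    apply IH (fun x hx => hds x (List.mem_cons_of_mem d hx))
    have h1 : (1 <<< (d - 1)) < 512 := by
      rw [Nat.shiftLeft_eq, one_mul]
      calc 2 ^ (d - 1) ≤ 2 ^ 8 := Nat.pow_le_pow_right (by norm_num) (by omega)
        _ < 512 := by norm_num
    exact Nat.or_lt_two_pow (n := 9) ha h1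

-- B's digit-mask loop on a positive input with no zero digit is the Nat fold …
theorem maskLoop_good : ∀ (m : Nat), (∀ d ∈ Nat.digits 10 m, d ≠ 0) →
    ∀ a : Nat, altMaskLoop (m : Int) (a : Int) = ((maskFold (Nat.digits 10 m) a : Nat) : Int) := by
  intro m
  induction m using Nat.strong_induction_on with
  | _ m IH =>
    intro h0 a
    rcases Nat.eq_zero_or_pos m with rfl | hm
    · rw [altMaskLoop]; simp [maskFold]
    · have hmz : (0:Int) < (m:Int) := by exact_mod_cast hm
      have hdig := Nat.digits_def' (b := 10) (by norm_num) hm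
      have hhead : m % 10 ≠ 0 := h0 (m % 10) (by rw [hdig]; exact List.mem_cons_self)
      rw [altMaskLoop, dif_pos hmz]
      simp only [pvMod10Cast, pvFloordiv10Cast]
      have hc : (((m % 10 : Nat) : Int) == 0) = false := by
        simp only [beq_eq_false_iff_ne, ne_eq]; exact_mod_cast hhead
      rw [hc]
      simp only [Bool.false_eq_true, if_false]
      have hsub : (((m % 10 : Nat) : Int) - 1).toNat = m % 10 - 1 := by omega
      rw [hsub, PySem.Int.bor_natCast]
      rw [IH (m / 10) (Nat.div_lt_self hm (by norm_num))
        (fun d hd => h0 d (by rw [hdig]; exact List.mem_cons_of_mem _ hd)) (a ||| 1 <<< (m % 10 - 1))]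
      rw [hdig]
      simp [maskFold]

-- … and returns -1 as soon as a zero digit occurs
theorem maskLoop_bad : ∀ (m : Nat), 0 ∈ Nat.digits 10 m →
    ∀ a : Int, altMaskLoop (m : Int) a = -1 := by
  intro m
  induction m using Nat.strong_induction_on with
  | _ m IH =>
    intro h0 a
    rcases Nat.eq_zero_or_pos m with rfl | hm
    · simp at h0
    · have hmz : (0:Int) < (m:Int) := by exact_mod_cast hm
      have hdig := Nat.digits_def' (b := 10) (by norm_num) hm
      rw [altMaskLoop, dif_pos hmz]
      simp only [pvMod10Cast, pvFloordiv10Cast]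
      by_cases hh : m % 10 = 0
      · simp [hh]
      · have hc : (((m % 10 : Nat) : Int) == 0) = false := by
          simp only [beq_eq_false_iff_ne, ne_eq]; exact_mod_cast hh
        rw [hc]
        simp only [Bool.false_eq_true, if_false]
        apply IH (m / 10) (Nat.div_lt_self hm (by norm_num))
        rw [hdig] at h0
        rcases List.mem_cons.1 h0 with h | h
        · exact absurd h.symm hh
        · exact h

-- bit test in B's comprehension, bridged to Nat.testBit
theorem band_shift_testBit (mn k : Nat) :
    (PySem.Int.band ((mn : Int) >>> k) 1 != 0) = mn.testBit k := by
  rw [← Int.natCast_shiftRight, show (1:Int) = ((1:Nat):Int) from rfl, PySem.Int.band_natCast,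
    Nat.and_one_is_mod, Nat.testBit, Nat.and_comm, Nat.and_one_is_mod]
  rcases Nat.mod_two_eq_zero_or_one (mn >>> k) with h | h <;> simp [h]

-- membership in B's digit list of a Nat mask
theorem mem_altDigits (mn : Nat) (d : Int) :
    d ∈ altDigits (mn : Int) ↔ 1 ≤ d ∧ d < 10 ∧ mn.testBit (d - 1).toNat := by
  unfold altDigits
  rw [List.mem_filter, PySem.List.mem_pyRange_one, band_shift_testBit]
  tauto

-- for the mask of a zero-free m, membership is exactly "d is a digit of m"
theorem mem_altDigits_maskFold (m : Nat) (h0 : ∀ d ∈ Nat.digits 10 m, d ≠ 0) (d : Int) :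
    d ∈ altDigits ((maskFold (Nat.digits 10 m) 0 : Nat) : Int) ↔
      1 ≤ d ∧ d < 10 ∧ d.toNat ∈ Nat.digits 10 m := by
  have h1 : ∀ x ∈ Nat.digits 10 m, 1 ≤ x := fun x hx => Nat.one_le_iff_ne_zero.2 (h0 x hx)
  rw [mem_altDigits]
  constructor
  · rintro ⟨ha, hb, hc⟩
    rw [maskFold_testBit _ h1] at hc
    simp only [Nat.zero_testBit, Bool.false_or, decide_eq_true_eq] at hc
    refine ⟨ha, hb, ?_⟩
    rwa [show (d - 1).toNat + 1 = d.toNat from by omega] at hc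
  · rintro ⟨ha, hb, hc⟩
    refine ⟨ha, hb, ?_⟩
    rw [maskFold_testBit _ h1]
    simp only [Nat.zero_testBit, Bool.false_or, decide_eq_true_eq]
    rwa [show (d - 1).toNat + 1 = d.toNat from by omega]

theorem altDigits_nodup (mask : Int) : (altDigits mask).Nodup :=
  List.Nodup.filter _ (PySem.List.nodup_pyRange_one 1 10)

-- its length is the number of distinct digits of m
theorem length_altDigits_maskFold (m : Nat) (h0 : ∀ d ∈ Nat.digits 10 m, d ≠ 0) :
    (altDigits ((maskFold (Nat.digits 10 m) 0 : Nat) : Int)).length =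
      (Nat.digits 10 m).toFinset.card := by
  rw [← List.toFinset_card_of_nodup (altDigits_nodup _)]
  have himg : (altDigits ((maskFold (Nat.digits 10 m) 0 : Nat) : Int)).toFinset =
      (Nat.digits 10 m).toFinset.image (fun n : Nat => (n : Int)) := by
    ext x
    simp only [List.mem_toFinset, Finset.mem_image, mem_altDigits_maskFold m h0]
    constructor
    · rintro ⟨ha, hb, hc⟩
      exact ⟨x.toNat, hc, by omega⟩
    · rintro ⟨n, hn, rfl⟩
      have hlt : n < 10 := Nat.digits_lt_base (by norm_num) hn
      have hne : n ≠ 0 := h0 n hn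
      exact ⟨by exact_mod_cast Nat.one_le_iff_ne_zero.2 hne, by exact_mod_cast hlt,
        by simpa using hn⟩
  rw [himg, Finset.card_image_of_injective _ (fun a b h => by exact_mod_cast h)]

-- masks below 63 select fewer than six digits (checked by computation)
theorem small_mask_short : ∀ mn : Nat, mn < 63 → (altDigits (mn : Int)).length < 6 := by
  decide

-- the Euclid loop computes Nat.gcd
theorem gcdLoop_eq : ∀ (x g : Nat), altGcdLoop (g : Int) (x : Int) = ((Nat.gcd x g : Nat) : Int) := by
  intro x
  induction x using Nat.strong_induction_on with
  | _ x IH =>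
    intro g
    rcases Nat.eq_zero_or_pos x with rfl | hx
    · rw [altGcdLoop]; simp
    · have hxz : (0:Int) < (x:Int) := by exact_mod_cast hx
      rw [altGcdLoop, dif_pos hxz,
        show PySem.Int.mod (g:Int) (x:Int) = ((g % x : Nat) : Int) from PySem.Int.mod_natCast g x,
        IH (g % x) (Nat.mod_lt g hx) x, Nat.gcd_rec x g]

theorem lcm_step (a b : Nat) (ha : 0 < a) (hb : 0 < b) :
    a / Nat.gcd b a * b = Nat.lcm a b := by
  rw [Nat.gcd_comm b a, Nat.lcm, Nat.div_mul_right_comm (Nat.gcd_dvd_left a b) b]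

theorem altLcm_fold (ds : List Int) (hds : ∀ d ∈ ds, 1 ≤ d) :
    ∀ a : Nat, 0 < a →
      ds.foldl (fun l d => PySem.Int.floordiv l (altGcdLoop l d) * d) (a : Int) =
        ((ds.foldl (fun l d => Nat.lcm l d.toNat) a : Nat) : Int) := by
  induction ds with
  | nil => intro a _; simp
  | cons d t IH =>
    intro a ha
    have hd : 1 ≤ d := hds d List.mem_cons_self
    have hdn : d = ((d.toNat : Nat) : Int) := by omega
    simp only [List.foldl_cons]
    rw [hdn, gcdLoop_eq d.toNat a,
      show PySem.Int.floordiv (a:Int) ((Nat.gcd d.toNat a : Nat) : Int)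
          = ((a / Nat.gcd d.toNat a : Nat) : Int) from PySem.Int.floordiv_natCast _ _,
      show ((a / Nat.gcd d.toNat a : Nat) : Int) * ((d.toNat : Nat) : Int)
          = ((a / Nat.gcd d.toNat a * d.toNat : Nat) : Int) from by push_cast; ring,
      lcm_step a d.toNat ha (by omega)]
    exact IH (fun x hx => hds x (List.mem_cons_of_mem d hx)) _
      (Nat.pos_of_ne_zero (Nat.lcm_ne_zero (by omega) (by omega)))

-- the lcm fold, in Nat
theorem altLcm_eq (ds : List Int) (hds : ∀ d ∈ ds, 1 ≤ d) :
    altLcm ds = ((ds.foldl (fun l d => Nat.lcm l d.toNat) 1 : Nat) : Int) := by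
  have := altLcm_fold ds hds 1 one_pos
  simpa [altLcm] using this

theorem natLcmFold_dvd_iff (ds : List Int) : ∀ (a n : Nat),
    (ds.foldl (fun l d => Nat.lcm l d.toNat) a ∣ n ↔ a ∣ n ∧ ∀ d ∈ ds, d.toNat ∣ n) := by
  induction ds with
  | nil => intro a n; simp
  | cons d t IH =>
    intro a n
    simp only [List.foldl_cons]
    rw [IH, Nat.lcm_dvd_iff]
    simp [and_assoc]

theorem natLcmFold_pos (ds : List Int) (hds : ∀ d ∈ ds, 1 ≤ d) :
    ∀ a : Nat, 0 < a → 0 < ds.foldl (fun l d => Nat.lcm l d.toNat) a := by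
  induction ds with
  | nil => intro a ha; simpa using ha
  | cons d t IH =>
    intro a ha
    have hd : 1 ≤ d := hds d List.mem_cons_self
    simp only [List.foldl_cons]
    exact IH (fun x hx => hds x (List.mem_cons_of_mem d hx)) _
      (Nat.pos_of_ne_zero (Nat.lcm_ne_zero (by omega) (by omega)))

theorem altLcm_pos (ds : List Int) (hds : ∀ d ∈ ds, 1 ≤ d) : 0 < altLcm ds := by
  rw [altLcm_eq ds hds]
  exact_mod_cast natLcmFold_pos ds hds 1 one_pos

-- altLcm divides a positive x iff every listed digit divides x
theorem altLcm_dvd_iff (ds : List Int) (hds : ∀ d ∈ ds, 1 ≤ d) (x : Int) (hx : 0 ≤ x) :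
    (altLcm ds ∣ x ↔ ∀ d ∈ ds, d ∣ x) := by
  rw [altLcm_eq ds hds, show x = ((x.toNat : Nat) : Int) from by omega, Int.natCast_dvd_natCast,
    natLcmFold_dvd_iff ds 1 x.toNat]
  constructor
  · rintro ⟨-, h⟩ d hd
    have : d = ((d.toNat : Nat) : Int) := by have := hds d hd; omega
    rw [this, Int.natCast_dvd_natCast]
    exact h d hd
  · intro h
    refine ⟨Nat.one_dvd _, fun d hd => ?_⟩
    have hd1 := hds d hd
    have := h d hd
    rw [show d = ((d.toNat : Nat) : Int) from by omega, Int.natCast_dvd_natCast] at this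
    exact this

-- B's inner counting predicate, as one Boolean on the number
def Qb (mask x : Int) : Bool :=
  decide (6 ≤ (altDigits mask).length) && decide (1 ≤ x) &&
  (PySem.Int.mod x (altLcm (altDigits mask)) == 0) && (altMaskLoop x 0 == mask)

-- countP over a nodup list is a filtered cardinality over its finset
theorem countP_eq_card_filter (xs : List Int) (hnd : xs.Nodup) (p : Int → Bool) :
    xs.countP p = (xs.toFinset.filter (fun x => p x)).card := by
  rw [List.countP_eq_length_filter,
    ← List.toFinset_card_of_nodup (List.Nodup.filter _ hnd), List.toFinset_filter]

-- the strided range is the filtered unit range, as finsets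
theorem stride_toFinset (L H l : Int) (hl : 0 < l) :
    (PySem.List.pyRange (-(PySem.Int.floordiv (-(max L 1)) l) * l) (H + 1) l).toFinset =
      (PySem.List.pyRange L (H + 1) 1).toFinset.filter (fun x => 1 ≤ x ∧ l ∣ x) := by
  set s := -(PySem.Int.floordiv (-(max L 1)) l) with hs
  have hb := (PySem.Int.neg_floordiv_neg_eq_iff_of_pos (a := max L 1) (b := l) (q := s) hl).1 rfl
  ext x
  rw [Finset.mem_filter, List.mem_toFinset, List.mem_toFinset,
    PySem.List.mem_pyRange_iff_of_pos hl, PySem.List.mem_pyRange_one]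
  constructor
  · rintro ⟨h1, h2, k, hk⟩
    have hxl : l ∣ x := ⟨s + k, by linarith [hk]⟩
    exact ⟨⟨by linarith [le_max_left L 1, hb.2], h2⟩, by linarith [le_max_right L 1, hb.2], hxl⟩
  · rintro ⟨⟨h1, h2⟩, h3, k, hk⟩
    have hlo : max L 1 ≤ x := max_le h1 h3
    have hk1 : s - 1 < k := by nlinarith [hb.1]
    refine ⟨?_, h2, ⟨k - s, by rw [hk]; ring⟩⟩
    have hsk : s ≤ k := by omega
    calc s * l ≤ k * l := by nlinarith
      _ = x := by rw [hk]; ring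

theorem stride_nodup (a b l : Int) (hl : 0 < l) : (PySem.List.pyRange a b l).Nodup := by
  rw [PySem.List.pyRange_of_pos a b hl]
  apply List.Nodup.map _ (List.nodup_range)
  intro k1 k2 h
  simp only [add_right_inj] at h
  have := mul_left_cancel₀ (by omega : l ≠ 0) h
  exact_mod_cast this

-- B's per-mask contribution is a filtered cardinality over the unit range
theorem altDigits_ge_one (mask : Int) : ∀ d ∈ altDigits mask, 1 ≤ d := by
  intro d hd
  exact ((PySem.List.mem_pyRange_one).1 (List.mem_filter.1 hd).1).1

-- B's per-mask contribution is a filtered cardinality over the unit range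
theorem bodyB_eq (L H : Int) (mask : Int) (count : Int) :
    (let digits := altDigits mask
     if digits.length < 6 then count
     else
       let l := altLcm digits
       let lo := max L 1
       let start := -(PySem.Int.floordiv (-lo) l) * l
       (PySem.List.pyRange start (H + 1) l).foldl
         (fun c num => if altMaskLoop num 0 == mask then c + 1 else c) count) =
    count + (((PySem.List.pyRange L (H + 1) 1).toFinset.filter (fun x => Qb mask x)).card : Int) := by
  dsimp only
  by_cases hlen : (altDigits mask).length < 6
  · rw [if_pos hlen]
    have hempty : (PySem.List.pyRange L (H + 1) 1).toFinset.filter (fun x => Qb mask x) = ∅ := by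
      apply Finset.filter_false_of_mem
      intro x hx
      simp only [Qb, Bool.and_eq_true, decide_eq_true_eq]
      omega
    rw [hempty]
    simp
  · rw [if_neg hlen]
    have hdd := altDigits_ge_one mask
    have hl : 0 < altLcm (altDigits mask) := altLcm_pos _ hdd
    rw [PySem.List.foldl_if_add_one (fun num => altMaskLoop num 0 == mask) _ count]
    congr 1
    rw [countP_eq_card_filter _ (stride_nodup _ _ _ hl), stride_toFinset L H _ hl,
      Finset.filter_filter]
    rw [Nat.cast_inj]
    refine congrArg Finset.card (Finset.filter_congr
      (p := fun a => (1 ≤ a ∧ altLcm (altDigits mask) ∣ a) ∧ (altMaskLoop a 0 == mask) = true)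
      (q := fun x => Qb mask x = true) ?_)
    intro x hx
    simp only [Qb, Bool.and_eq_true, decide_eq_true_eq]
    constructor
    · rintro ⟨⟨h1, h2⟩, h3⟩
      exact ⟨⟨⟨by omega, h1⟩, beq_iff_eq.2 ((PySem.Int.mod_eq_zero_iff_dvd _ _).2 h2)⟩, h3⟩
    · rintro ⟨⟨⟨-, h1⟩, h2⟩, h3⟩
      exact ⟨⟨h1, (PySem.Int.mod_eq_zero_iff_dvd _ _).1 (beq_iff_eq.1 h2)⟩, h3⟩


-- the key double-counting step: for each x, exactly one mask counts x, and only if x is good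
theorem pointwise (x : Int) :
    (∑ mask ∈ (PySem.List.pyRange 63 512 1).toFinset, if Qb mask x then (1 : Nat) else 0) =
      (if goodB x then 1 else 0) := by
  by_cases hg : goodB x = true
  · have hgs := hg
    simp only [goodB, Bool.and_eq_true, decide_eq_true_eq, List.all_eq_true] at hgs
    obtain ⟨⟨⟨hx, h0⟩, h6⟩, hdv⟩ := hgs
    set m := x.toNat with hm
    have hxeq : x = (m : Int) := by omega
    have h0' : ∀ d ∈ Nat.digits 10 m, d ≠ 0 := fun d hd he => h0 (he ▸ hd)
    set mk := maskFold (Nat.digits 10 m) 0 with hmk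
    have hloop : altMaskLoop x 0 = ((mk : Nat) : Int) := by
      rw [hxeq]
      exact_mod_cast maskLoop_good m h0' 0
    have hlenmk : (altDigits ((mk : Nat) : Int)).length = (Nat.digits 10 m).toFinset.card :=
      length_altDigits_maskFold m h0'
    have hlt : mk < 512 := maskFold_lt _ (fun d hd => by
      have := Nat.digits_lt_base (by norm_num) hd; omega) 0 (by norm_num)
    have hge : 63 ≤ mk := by
      by_contra hcon
      have := small_mask_short mk (by omega)
      omega
    have hmem : ((mk : Nat) : Int) ∈ (PySem.List.pyRange 63 512 1).toFinset := by
      rw [List.mem_toFinset, PySem.List.mem_pyRange_one]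
      constructor
      · exact_mod_cast hge
      · exact_mod_cast hlt
    have hqb : Qb ((mk : Nat) : Int) x = true := by
      simp only [Qb, Bool.and_eq_true, decide_eq_true_eq, beq_iff_eq]
      refine ⟨⟨⟨by omega, by omega⟩, ?_⟩, hloop⟩
      rw [PySem.Int.mod_eq_zero_iff_dvd,
        altLcm_dvd_iff _ (altDigits_ge_one _) x (by omega)]
      intro d hd
      obtain ⟨hd1, hd2, hd3⟩ := (mem_altDigits_maskFold m h0' d).1 hd
      have hmodd : PySem.Int.mod x ((d.toNat : Nat) : Int) = 0 := by
        have := hdv d.toNat hd3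
        rwa [beq_iff_eq] at this
      rw [← PySem.Int.mod_eq_zero_iff_dvd]
      rwa [show ((d.toNat : Nat) : Int) = d from by omega] at hmodd
    rw [Finset.sum_eq_single_of_mem _ hmem ?uniq, if_pos hqb, if_pos hg]
    case uniq =>
      intro b hb hne
      have hnq : ¬ (Qb b x = true) := by
        intro hQ
        simp only [Qb, Bool.and_eq_true, beq_iff_eq] at hQ
        exact hne (by rw [← hQ.2, hloop])
      rw [if_neg hnq]
  · rw [if_neg hg]
    apply Finset.sum_eq_zero
    intro mask hmask
    have hmaskrange : 63 ≤ mask ∧ mask < 512 := by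
      rw [List.mem_toFinset, PySem.List.mem_pyRange_one] at hmask
      exact hmask
    have hnq : ¬ (Qb mask x = true) := by
      intro hQ
      apply hg
      simp only [Qb, Bool.and_eq_true, decide_eq_true_eq, beq_iff_eq] at hQ
      obtain ⟨⟨⟨hlen6, hx1⟩, hmod⟩, hloopeq⟩ := hQ
      set m := x.toNat with hm
      have hxeq : x = (m : Int) := by omega
      have h0' : ∀ d ∈ Nat.digits 10 m, d ≠ 0 := by
        intro d hd he
        subst he
        have hbad := maskLoop_bad m hd 0
        rw [← hxeq] at hbad
        omega
      have hloop : altMaskLoop x 0 = ((maskFold (Nat.digits 10 m) 0 : Nat) : Int) := by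
        rw [hxeq]
        exact_mod_cast maskLoop_good m h0' 0
      have hmaskeq : mask = ((maskFold (Nat.digits 10 m) 0 : Nat) : Int) := by
        rw [← hloopeq, hloop]
      have hdvd : ∀ d ∈ altDigits mask, d ∣ x :=
        (altLcm_dvd_iff _ (altDigits_ge_one mask) x (by omega)).1
          ((PySem.Int.mod_eq_zero_iff_dvd _ _).1 hmod)
      simp only [goodB, Bool.and_eq_true, decide_eq_true_eq, List.all_eq_true]
      refine ⟨⟨⟨by omega, fun hd => h0' 0 hd rfl⟩, ?_⟩, ?_⟩
      · rw [← length_altDigits_maskFold m h0', ← hmaskeq]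
        exact hlen6
      · intro d hd
        have hdne := h0' d hd
        have hdlt : d < 10 := Nat.digits_lt_base (by norm_num) hd
        have hdin : ((d : Nat) : Int) ∈ altDigits mask := by
          rw [hmaskeq, mem_altDigits_maskFold m h0']
          exact ⟨by exact_mod_cast Nat.one_le_iff_ne_zero.2 hdne, by exact_mod_cast hdlt,
            by simpa using hd⟩
        have := hdvd _ hdin
        rw [beq_iff_eq, PySem.Int.mod_eq_zero_iff_dvd]
        exact this
    rw [if_neg hnq]

-- B is the reference count over [L, H]
theorem sum_card_eq (L H : Int) :
    (∑ mask ∈ (PySem.List.pyRange 63 512 1).toFinset,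
      ((PySem.List.pyRange L (H + 1) 1).toFinset.filter (fun x => Qb mask x)).card)
    = ((PySem.List.pyRange L (H + 1) 1).toFinset.filter (fun x => goodB x)).card := by
  have h1 : ∀ mask : Int,
      ((PySem.List.pyRange L (H + 1) 1).toFinset.filter (fun x => Qb mask x)).card
      = ∑ x ∈ (PySem.List.pyRange L (H + 1) 1).toFinset, if Qb mask x then 1 else 0 :=
    fun mask => Finset.card_filter _ _
  simp only [h1]
  rw [Finset.sum_comm, Finset.card_filter]
  exact Finset.sum_congr rfl (fun x _ => pointwise x)

theorem B_eq_count (L H : Int) :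
    numbersInRange_alt L H = ((PySem.List.pyRange L (H + 1) 1).countP goodB : Int) := by
  unfold numbersInRange_alt
  rw [PySem.List.foldl_congr_mem _ _
    (fun count mask => count +
      (((PySem.List.pyRange L (H + 1) 1).toFinset.filter (fun x => Qb mask x)).card : Int)) 0
    (fun acc mask _ => bodyB_eq L H mask acc)]
  rw [PySem.List.foldl_add _ _ 0, zero_add,
    ← List.sum_toFinset _ (PySem.List.nodup_pyRange_one 63 512),
    ← Nat.cast_sum, sum_card_eq L H,
    countP_eq_card_filter _ (PySem.List.nodup_pyRange_one L (H + 1)) goodB]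

-- ===== VERDICT (by name: the statement is the Claim_ definition above) =====
theorem numbersInRange_spec : Claim_equal_numbersInRange := by
  intro L H _ hpre
  unfold Spec_numbersInRange
  rw [A_eq_count L H hpre, B_eq_count L H]
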